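-- pv_equiv track=rewrite | github.com/xiejun4/AI-Python-Project | pro_AI_PathFinder/functions/bt_analysis.py | check_station
-- ===== SOURCE A (Python) =====
-- def check_station(log_title_info):
--     """
--     Process log title information and determine if the process belongs to BT station
--
--     Args:
--     log_title_info (dict): Dictionary containing log information, must include "process" key
--
--     Returns:
--     dict: Processed log information dictionary
--     """
--     # Define keywords for BT station (case-insensitive)
--     bt_keywords = {"boardtst", "brdtest", "5gfr1bdtst"}
--
--     # Get process value and convert to lowercase for comparison
--     process_value = log_title_info.get("process", "").lower()
--
--     # Check if process contains any BT station keywords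
--     is_bt_station = any(keyword in process_value for keyword in bt_keywords)
--
--     if is_bt_station:
--         return "BT"
--     else:
--         return "other"
-- ===== SOURCE B (Python) =====
-- def check_station(log_title_info):
--     """Single left-to-right scan: at each position test whether any BT keyword
--     starts there, instead of three independent substring membership tests."""
--     keywords = ("boardtst", "brdtest", "5gfr1bdtst")
--     s = log_title_info.get("process", "").lower()
--     for i in range(len(s) + 1):
--         if any(s.startswith(k, i) for k in keywords):
--             return "BT"
--     return "other"
-- ===== Notes on version B (the rewrite author's own statement) =====
-- stated objective: alternative
-- what changed: B replaces the three independent 'keyword in s' substring tests with one explicit left-to-right scan of the lowered string, testing at each position whether any keyword starts there.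
import Mathlib
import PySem

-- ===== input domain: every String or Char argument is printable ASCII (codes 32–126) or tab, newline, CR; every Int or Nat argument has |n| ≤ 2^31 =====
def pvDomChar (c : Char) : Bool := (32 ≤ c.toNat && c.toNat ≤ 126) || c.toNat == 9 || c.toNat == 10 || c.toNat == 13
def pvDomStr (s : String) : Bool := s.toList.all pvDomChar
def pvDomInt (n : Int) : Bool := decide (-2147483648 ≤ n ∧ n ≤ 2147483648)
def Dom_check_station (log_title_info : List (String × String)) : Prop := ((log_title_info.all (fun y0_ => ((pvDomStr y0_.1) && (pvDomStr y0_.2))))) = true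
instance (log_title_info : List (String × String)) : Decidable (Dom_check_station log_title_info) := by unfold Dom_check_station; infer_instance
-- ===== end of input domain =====

-- B replaces the three independent substring membership tests with one explicit left-to-right
-- scan testing each position for any keyword (alternative decomposition, same cost).


-- ===== PORT A =====
def check_station (log_title_info : List (String × String)) : String :=
  let bt_keywords : PySem.Set String := PySem.Set.ofList ["boardtst", "brdtest", "5gfr1bdtst"]
  let process_value := PySem.Str.lower ((PySem.Dict.mk log_title_info).getD "process" "")
  let is_bt_station := bt_keywords.any (fun keyword => PySem.Str.isIn keyword process_value)
  if is_bt_station then "BT" else "other"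

-- ===== PORT B =====
-- B-side helpers: test the three keywords at one position, and scan positions left to right
def pvHitAt (s : List Char) : Bool :=
  ["boardtst".toList, "brdtest".toList, "5gfr1bdtst".toList].any
    (fun k => PySem.Chars.startswith s k)

def pvBtScan : List Char → Bool
  | [] => pvHitAt []
  | c :: t => pvHitAt (c :: t) || pvBtScan t

def check_station_alt (log_title_info : List (String × String)) : String :=
  let s := PySem.Str.lower ((PySem.Dict.mk log_title_info).getD "process" "")
  if pvBtScan s.toList then "BT" else "other"

-- ===== PRECONDITION & SPEC =====
def Spec_check_station (log_title_info : List (String × String)) (out : String) : Prop := out = check_station_alt log_title_info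
instance (log_title_info : List (String × String)) (out : String) : Decidable (Spec_check_station log_title_info out) := by unfold Spec_check_station; infer_instance

-- ===== CLAIM (what is proved, stated in full; the proofs are below) =====
def Claim_equal_check_station : Prop := ∀ (log_title_info : List (String × String)), Dom_check_station log_title_info → Spec_check_station log_title_info (check_station log_title_info)

-- ===== LEMMAS AND PROOFS =====

-- the scan hits iff some keyword starts at some dropped position
theorem pvBtScan_iff (s : List Char) : pvBtScan s = true ↔ ∃ j, pvHitAt (s.drop j) = true := by
  induction s with
  | nil =>
    simp only [pvBtScan]
    constructor
    · intro h; exact ⟨0, h⟩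
    · rintro ⟨j, h⟩; simpa using h
  | cons c t ih =>
    simp only [pvBtScan, Bool.or_eq_true, ih]
    constructor
    · rintro (h | ⟨j, h⟩)
      · exact ⟨0, h⟩
      · exact ⟨j + 1, h⟩
    · rintro ⟨j, h⟩
      cases j with
      | zero => exact Or.inl h
      | succ j => exact Or.inr ⟨j, h⟩

theorem pvBtScan_eq_isIn (s : List Char) :
    pvBtScan s = (PySem.Chars.isIn "boardtst".toList s ||
      PySem.Chars.isIn "brdtest".toList s || PySem.Chars.isIn "5gfr1bdtst".toList s) := by
  rcases h : (PySem.Chars.isIn "boardtst".toList s ||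
      PySem.Chars.isIn "brdtest".toList s || PySem.Chars.isIn "5gfr1bdtst".toList s) with _ | _
  · simp only [Bool.or_eq_false_iff] at h
    rw [← Bool.not_eq_true, pvBtScan_iff]
    rintro ⟨j, hj⟩
    simp only [pvHitAt, List.any_cons, List.any_nil, Bool.or_eq_true,
      PySem.Chars.startswith_iff, Bool.or_false] at hj
    rcases hj with hk | hk | hk
    · exact Bool.false_ne_true (h.1.1 ▸ (PySem.Chars.exists_prefix_drop_iff_isIn _ _).mp ⟨j, hk⟩)
    · exact Bool.false_ne_true (h.1.2 ▸ (PySem.Chars.exists_prefix_drop_iff_isIn _ _).mp ⟨j, hk⟩)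
    · exact Bool.false_ne_true (h.2 ▸ (PySem.Chars.exists_prefix_drop_iff_isIn _ _).mp ⟨j, hk⟩)
  · rw [pvBtScan_iff]
    simp only [Bool.or_eq_true] at h
    rcases h with (h | h) | h <;>
      rcases (PySem.Chars.exists_prefix_drop_iff_isIn _ _).mpr h with ⟨j, hj⟩ <;>
      refine ⟨j, ?_⟩ <;>
      simp only [pvHitAt, List.any_cons, List.any_nil, Bool.or_eq_true,
        PySem.Chars.startswith_iff, Bool.or_false] <;>
      first
        | exact Or.inl hj
        | exact Or.inr (Or.inl hj)
        | exact Or.inr (Or.inr hj)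

-- ===== VERDICT (by name: the statement is the Claim_ definition above) =====
theorem check_station_spec : Claim_equal_check_station := by
  intro d _
  unfold Spec_check_station check_station check_station_alt
  simp only [pvBtScan_eq_isIn]
  simp [PySem.Set.ofList, PySem.Set.add, PySem.Str.isIn_eq, Bool.or_assoc]
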